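-- pv_equiv track=rewrite | github.com/boubakerwa/jarvis | dashboard/app.py | _app_status_from_logs
-- ===== SOURCE A (Python) =====
-- def _app_status_from_logs(lines: list[str]) -> str:
--     for line in reversed(lines):
--         if "Application is stopping" in line:
--             return "stopping"
--         if "Application started" in line:
--             return "running"
--         if "Starting Marvis" in line or "Starting Jarvis" in line:
--             return "starting"
--     return "unknown"
-- ===== SOURCE B (Python) =====
-- _RULES = [
--     ("Application is stopping", "stopping"),
--     ("Application started", "running"),
--     ("Starting Marvis", "starting"),
--     ("Starting Jarvis", "starting"),
-- ]
--
--
-- def _classify(line: str):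
--     return next((status for keyword, status in _RULES if keyword in line), None)
--
--
-- def _app_status_from_logs(lines: list[str]) -> str:
--     status = "unknown"
--     for line in lines:
--         c = _classify(line)
--         if c is not None:
--             status = c
--     return status
-- ===== Notes on version B (the rewrite author's own statement) =====
-- stated objective: alternative
-- what changed: Replaced the reverse-order early-exit if-chain with a forward single pass keeping a status accumulator (last write wins), with per-line classification driven by a keyword->status rule table instead of hard-coded branches.
import Mathlib
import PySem

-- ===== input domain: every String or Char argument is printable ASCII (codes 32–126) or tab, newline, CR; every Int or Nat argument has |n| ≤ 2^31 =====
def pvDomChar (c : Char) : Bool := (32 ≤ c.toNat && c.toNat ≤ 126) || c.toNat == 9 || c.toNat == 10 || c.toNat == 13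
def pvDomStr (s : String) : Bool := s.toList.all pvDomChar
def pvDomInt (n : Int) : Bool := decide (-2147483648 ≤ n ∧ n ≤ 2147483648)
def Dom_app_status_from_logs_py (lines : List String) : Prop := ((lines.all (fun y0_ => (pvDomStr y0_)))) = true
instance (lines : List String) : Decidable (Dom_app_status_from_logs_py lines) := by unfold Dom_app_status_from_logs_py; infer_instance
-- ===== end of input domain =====

-- B changes the decomposition (forward accumulator pass instead of reverse early-exit scan); same cost.

-- ===== PORT A =====
-- Literal port of A: scan reversed(lines), return at the first keyword hit.
def appStatusGoA : List String → String
  | [] => "unknown"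
  | line :: rest =>
    if PySem.Str.isIn "Application is stopping" line then "stopping"
    else if PySem.Str.isIn "Application started" line then "running"
    else if PySem.Str.isIn "Starting Marvis" line || PySem.Str.isIn "Starting Jarvis" line then "starting"
    else appStatusGoA rest

def app_status_from_logs_py (lines : List String) : String :=
  appStatusGoA lines.reverse

-- ===== PORT B =====
-- Keyword -> status rule table; a line's status is the first matching rule.
def appStatusRules : List (String × String) :=
  [("Application is stopping", "stopping"),
   ("Application started", "running"),
   ("Starting Marvis", "starting"),
   ("Starting Jarvis", "starting")]

def appStatusClassify (line : String) : Option String :=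
  appStatusRules.findSome? (fun r => if PySem.Str.isIn r.1 line then some r.2 else none)

def app_status_from_logs_py_alt (lines : List String) : String :=
  lines.foldl (fun status line =>
    match appStatusClassify line with
    | some c => c
    | none => status) "unknown"

-- ===== PRECONDITION & SPEC =====
def Spec_app_status_from_logs_py (lines : List String) (out : String) : Prop := out = app_status_from_logs_py_alt lines
instance (lines : List String) (out : String) : Decidable (Spec_app_status_from_logs_py lines out) := by unfold Spec_app_status_from_logs_py; infer_instance

-- ===== CLAIM (what is proved, stated in full; the proofs are below) =====
def Claim_equal_app_status_from_logs_py : Prop := ∀ (lines : List String), Dom_app_status_from_logs_py lines → Spec_app_status_from_logs_py lines (app_status_from_logs_py lines)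

-- ===== LEMMAS AND PROOFS =====

-- B's rule table, first match, equals A's per-line if-chain.
theorem appStatusClassify_eq (line : String) :
    appStatusClassify line =
      (if PySem.Str.isIn "Application is stopping" line then some "stopping"
       else if PySem.Str.isIn "Application started" line then some "running"
       else if PySem.Str.isIn "Starting Marvis" line || PySem.Str.isIn "Starting Jarvis" line then some "starting"
       else none) := by
  simp only [appStatusClassify, appStatusRules, List.findSome?]
  split_ifs <;> simp_all

-- A's scan is the first classification hit, default "unknown".
theorem appStatusGoA_eq_findSome (l : List String) :
    appStatusGoA l = (l.findSome? appStatusClassify).getD "unknown" := by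
  induction l with
  | nil => rfl
  | cons x xs ih =>
    simp only [appStatusGoA, List.findSome?, appStatusClassify_eq]
    split_ifs <;> simp [ih]

-- B's fold is the first classification hit of the REVERSED list, default the accumulator.
theorem foldl_eq_findSome_reverse (l : List String) (a : String) :
    l.foldl (fun status line =>
      match appStatusClassify line with
      | some c => c
      | none => status) a
    = (l.reverse.findSome? appStatusClassify).getD a := by
  induction l generalizing a with
  | nil => rfl
  | cons x xs ih =>
    simp only [List.foldl, List.reverse_cons, List.findSome?_append, ih]
    cases h : xs.reverse.findSome? appStatusClassify with
    | some s => simp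
    | none =>
      simp only [Option.none_or, List.findSome?]
      cases appStatusClassify x <;> simp

-- ===== VERDICT (by name: the statement is the Claim_ definition above) =====
theorem app_status_from_logs_py_spec : Claim_equal_app_status_from_logs_py := by
  intro lines _
  unfold Spec_app_status_from_logs_py app_status_from_logs_py app_status_from_logs_py_alt
  rw [appStatusGoA_eq_findSome, foldl_eq_findSome_reverse]
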